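-- pv_equiv track=rewrite | github.com/zhenya-mamenko/code-jam-2020 | Round 1/Overexcited Fan.py | calc
-- ===== SOURCE A (Python) =====
-- def move(X, Y, s):
--     if (s == "N"):
--         Y += 1
--     elif (s == "S"):
--         Y -= 1
--     elif (s == "E"):
--         X += 1
--     else:
--         X -= 1
--     return (X, Y, abs(X) + abs(Y))
--
-- def calc(X, Y, M):
--     n = 0
--     moves = []
--     count = len(M)
--     for i in range(count):
--         X, Y, m = move(X, Y, M[i])
--         moves.append((i + 1, m, X, Y))
--     for i in range(count):
--         if (moves[i][0] >= moves[i][1]):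
--             return moves[i][0]
--     return n
-- ===== SOURCE B (Python) =====
-- def calc(X, Y, M):
--     for i, s in enumerate(M, 1):
--         if s == "N":
--             Y += 1
--         elif s == "S":
--             Y -= 1
--         elif s == "E":
--             X += 1
--         else:
--             X -= 1
--         if i >= abs(X) + abs(Y):
--             return i
--     return 0
-- ===== Notes on version B (the rewrite author's own statement) =====
-- stated objective: simpler
-- what changed: B is one fused pass with inlined movement and an early return, instead of A's two phases (build a list of (step, distance, X, Y) tuples over the whole string, then rescan it for the first step index >= distance).
import Mathlib
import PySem

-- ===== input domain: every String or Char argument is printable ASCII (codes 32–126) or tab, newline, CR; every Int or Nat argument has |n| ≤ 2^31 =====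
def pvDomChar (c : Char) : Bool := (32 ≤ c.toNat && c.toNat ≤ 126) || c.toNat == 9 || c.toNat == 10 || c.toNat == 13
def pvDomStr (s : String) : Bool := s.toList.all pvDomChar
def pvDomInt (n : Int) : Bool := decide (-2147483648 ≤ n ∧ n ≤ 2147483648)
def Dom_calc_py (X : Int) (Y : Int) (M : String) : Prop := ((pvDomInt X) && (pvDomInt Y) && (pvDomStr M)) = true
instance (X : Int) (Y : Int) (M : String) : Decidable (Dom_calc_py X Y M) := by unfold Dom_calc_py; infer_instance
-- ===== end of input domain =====

-- ===== PORT A =====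
-- one honest line: B fuses A's build-then-rescan into a single early-exit pass; same return values everywhere.
def move_py (X : Int) (Y : Int) (s : Char) : Int × Int × Int :=
  if s = 'N' then (X, Y + 1, |X| + |Y + 1|)
  else if s = 'S' then (X, Y - 1, |X| + |Y - 1|)
  else if s = 'E' then (X + 1, Y, |X + 1| + |Y|)
  else (X - 1, Y, |X - 1| + |Y|)

-- first loop of A: build the moves table (step index, distance, X, Y)
def buildMoves (X : Int) (Y : Int) (i : Int) : List Char → List (Int × Int × Int × Int)
  | [] => []
  | c :: cs =>
    let t := move_py X Y c
    (i + 1, t.2.2, t.1, t.2.1) :: buildMoves t.1 t.2.1 (i + 1) cs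

-- second loop of A: first entry with step index >= distance, else n = 0
def scanMoves : List (Int × Int × Int × Int) → Int
  | [] => 0
  | t :: ts => if t.1 >= t.2.1 then t.1 else scanMoves ts

def calc_py (X : Int) (Y : Int) (M : String) : Int :=
  scanMoves (buildMoves X Y 0 M.toList)

-- ===== PORT B =====
def calcGo (X : Int) (Y : Int) (i : Int) : List Char → Int
  | [] => 0
  | c :: cs =>
    let X' := if c = 'E' then X + 1 else if c = 'N' ∨ c = 'S' then X else X - 1
    let Y' := if c = 'N' then Y + 1 else if c = 'S' then Y - 1 else Y
    if i + 1 ≥ |X'| + |Y'| then i + 1 else calcGo X' Y' (i + 1) cs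

def calc_py_alt (X : Int) (Y : Int) (M : String) : Int :=
  calcGo X Y 0 M.toList

-- ===== PRECONDITION & SPEC =====
def Spec_calc_py (X : Int) (Y : Int) (M : String) (out : Int) : Prop := out = calc_py_alt X Y M
instance (X : Int) (Y : Int) (M : String) (out : Int) : Decidable (Spec_calc_py X Y M out) := by unfold Spec_calc_py; infer_instance

-- ===== CLAIM (what is proved, stated in full; the proofs are below) =====
def Claim_equal_calc_py : Prop := ∀ (X : Int) (Y : Int) (M : String), Dom_calc_py X Y M → Spec_calc_py X Y M (calc_py X Y M)

-- ===== LEMMAS AND PROOFS =====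

theorem scan_build_eq_go (cs : List Char) : ∀ (X Y i : Int),
    scanMoves (buildMoves X Y i cs) = calcGo X Y i cs := by
  induction cs with
  | nil => intro X Y i; rfl
  | cons c cs ih =>
    intro X Y i
    simp only [buildMoves, scanMoves, calcGo, move_py]
    by_cases hN : c = 'N' <;> by_cases hS : c = 'S' <;> by_cases hE : c = 'E' <;>
      simp [hN, hS, hE, ih]

-- ===== VERDICT (by name: the statement is the Claim_ definition above) =====
theorem calc_py_spec : Claim_equal_calc_py := by
  intro X Y M _
  unfold Spec_calc_py calc_py calc_py_alt
  exact scan_build_eq_go M.toList X Y 0
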